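-- pv_equiv track=rewrite | github.com/gmalbert/horse-racing-predictions | scripts/predict_todays_races.py | extract_days_since_last_run
-- ===== SOURCE A (Python) =====
-- def extract_days_since_last_run(last_run_str):
--     """Extract days since last run from string (e.g., '25', '(240P)' -> 240)"""
--     if not last_run_str or last_run_str == '-':
--         return 999
--
--     # Remove parentheses and letters
--     clean_str = ''.join(c for c in str(last_run_str) if c.isdigit())
--
--     try:
--         return int(clean_str) if clean_str else 999
--     except:
--         return 999
-- ===== SOURCE B (Python) =====
-- def extract_days_since_last_run(last_run_str):
--     """Extract days since last run from string (e.g., '25', '(240P)' -> 240)"""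
--     if not last_run_str or last_run_str == '-':
--         return 999
--     value = 0
--     found = False
--     for c in str(last_run_str):
--         if c.isdigit():
--             value = value * 10 + (ord(c) - ord('0'))
--             found = True
--     return value if found else 999
-- ===== Notes on version B (the rewrite author's own statement) =====
-- stated objective: simpler
-- what changed: Instead of building an intermediate digit-only string and delegating to int() inside a try/except, B parses in a single pass with a running integer accumulator (value = value*10 + digit) and a found-a-digit flag.
import Mathlib
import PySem

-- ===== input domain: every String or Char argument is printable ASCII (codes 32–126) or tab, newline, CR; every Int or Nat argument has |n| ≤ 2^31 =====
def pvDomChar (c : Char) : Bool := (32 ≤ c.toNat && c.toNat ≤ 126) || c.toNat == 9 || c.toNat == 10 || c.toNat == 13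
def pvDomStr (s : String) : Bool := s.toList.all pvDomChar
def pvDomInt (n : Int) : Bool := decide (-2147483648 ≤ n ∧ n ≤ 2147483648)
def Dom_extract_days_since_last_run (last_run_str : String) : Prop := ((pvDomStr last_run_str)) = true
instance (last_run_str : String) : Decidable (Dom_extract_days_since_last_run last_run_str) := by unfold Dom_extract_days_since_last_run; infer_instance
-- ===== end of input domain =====

-- B replaces A's "filter digits into a string, then int() in a try/except" by a single
-- accumulator pass (value*10 + digit with a found flag); return values are proved equal.

-- ===== PORT A =====
-- Hand port of Python's `int(s)` on List Char (PySem.Int.ofChars? hides its digit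
-- recursion behind private names, so the identical algorithm is restated here publicly;
-- exact on the ASCII domain: strip int-whitespace, optional sign, digits with single '_'
-- separators, none = ValueError).
def pyIntGo (l : List Char) (afterDigit : Bool) (acc : Nat) : Option Nat :=
  match l, afterDigit, acc with
  | [], afterDigit, acc => if afterDigit then some acc else none
  | c :: rest, afterDigit, acc =>
    if PySem.Chars.isdigit c then pyIntGo rest true (acc * 10 + (c.toNat - '0'.toNat))
    else if c = '_' ∧ afterDigit then
      match rest with
      | d :: _ => if PySem.Chars.isdigit d then pyIntGo rest false acc else none
      | [] => none
    else none

def pyIntDigitsVal? : List Char → Option Nat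
  | [] => none
  | cs => pyIntGo cs false 0

def pyInt? (s : List Char) : Option Int :=
  match ((s.dropWhile PySem.Int.isIntSpace).reverse.dropWhile PySem.Int.isIntSpace).reverse with
  | '-' :: ds => (pyIntDigitsVal? ds).map (fun n => -(n : Int))
  | '+' :: ds => (pyIntDigitsVal? ds).map (fun n => (n : Int))
  | ds => (pyIntDigitsVal? ds).map (fun n => (n : Int))

def extract_days_since_last_run (last_run_str : String) : Int :=
  if last_run_str = "" || last_run_str = "-" then 999
  else
    -- ''.join(c for c in str(last_run_str) if c.isdigit()), kept as a character list
    let clean_str := last_run_str.toList.filter PySem.Chars.isdigit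
    if clean_str ≠ [] then
      match pyInt? clean_str with   -- try: int(clean_str)  except: 999
      | some n => n
      | none => 999
    else 999

-- ===== PORT B =====
def extract_days_since_last_run_alt (last_run_str : String) : Int :=
  if last_run_str = "" || last_run_str = "-" then 999
  else
    let st := last_run_str.toList.foldl
      (fun (st : Int × Bool) c =>
        if PySem.Chars.isdigit c then (st.1 * 10 + ((c.toNat : Int) - ('0'.toNat : Int)), true)
        else st)
      (0, false)
    if st.2 then st.1 else 999

-- ===== PRECONDITION & SPEC =====
def Spec_extract_days_since_last_run (last_run_str : String) (out : Int) : Prop := out = extract_days_since_last_run_alt last_run_str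
instance (last_run_str : String) (out : Int) : Decidable (Spec_extract_days_since_last_run last_run_str out) := by unfold Spec_extract_days_since_last_run; infer_instance

-- ===== CLAIM (what is proved, stated in full; the proofs are below) =====
def Claim_equal_extract_days_since_last_run : Prop := ∀ (last_run_str : String), Dom_extract_days_since_last_run last_run_str → Spec_extract_days_since_last_run last_run_str (extract_days_since_last_run last_run_str)

-- ===== LEMMAS AND PROOFS =====

lemma digit_toNat_ge {c : Char} (h : PySem.Chars.isdigit c = true) : 48 ≤ c.toNat := by
  simp [PySem.Chars.isdigit, Char.le_def] at h
  have := h.1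
  simp [UInt32.le_iff_toNat_le] at this
  exact this

-- a digit character is not int-whitespace
lemma not_intSpace_of_digit {c : Char} (h : PySem.Chars.isdigit c = true) :
    PySem.Int.isIntSpace c = false := by
  simp only [PySem.Int.isIntSpace, Bool.or_eq_false_iff, decide_eq_false_iff_not]
  repeat' constructor
  all_goals (rintro rfl; exact absurd h (by decide))

-- dropWhile strips nothing from an all-digit list
lemma dropWhile_digits (l : List Char) (h : ∀ c ∈ l, PySem.Chars.isdigit c = true) :
    l.dropWhile PySem.Int.isIntSpace = l := by
  cases l with
  | nil => rfl
  | cons c cs =>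
    rw [List.dropWhile_cons, not_intSpace_of_digit (h c (by simp))]
    simp

-- the Nat accumulator loop of int(), on an all-digit list
lemma pyIntGo_all_digits (ds : List Char) (acc : Nat)
    (h : ∀ c ∈ ds, PySem.Chars.isdigit c = true) :
    pyIntGo ds true acc =
      some (ds.foldl (fun a c => a * 10 + (c.toNat - '0'.toNat)) acc) := by
  induction ds generalizing acc with
  | nil => rfl
  | cons c rest ih =>
    have hc := h c (by simp)
    rw [pyIntGo.eq_def]
    simp only [hc, if_true, List.foldl_cons]
    exact ih _ (fun d hd => h d (by simp [hd]))

-- the Int accumulator equals the Nat accumulator (all characters are digits)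
lemma foldl_int_eq_nat (ds : List Char) (acc : Nat)
    (h : ∀ c ∈ ds, PySem.Chars.isdigit c = true) :
    ds.foldl (fun (a : Int) c => a * 10 + ((c.toNat : Int) - ('0'.toNat : Int))) (acc : Int)
      = ((ds.foldl (fun a c => a * 10 + (c.toNat - '0'.toNat)) acc : Nat) : Int) := by
  induction ds generalizing acc with
  | nil => rfl
  | cons c rest ih =>
    have h48 := digit_toNat_ge (h c (by simp))
    have hcast : (acc : Int) * 10 + ((c.toNat : Int) - ('0'.toNat : Int))
        = ((acc * 10 + (c.toNat - '0'.toNat) : Nat) : Int) := by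
      have h0 : '0'.toNat = 48 := rfl
      rw [h0]; push_cast [Nat.cast_sub h48]; ring
    rw [List.foldl_cons, List.foldl_cons, hcast]
    exact ih _ (fun d hd => h d (by simp [hd]))

-- B's fold once a digit has been found
lemma foldB_true (l : List Char) (v : Int) :
    l.foldl (fun (st : Int × Bool) c =>
        if PySem.Chars.isdigit c then (st.1 * 10 + ((c.toNat : Int) - ('0'.toNat : Int)), true) else st)
      (v, true)
      = ((l.filter PySem.Chars.isdigit).foldl
          (fun (a : Int) c => a * 10 + ((c.toNat : Int) - ('0'.toNat : Int))) v, true) := by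
  induction l generalizing v with
  | nil => rfl
  | cons c rest ih =>
    rw [List.foldl_cons, List.filter_cons]
    by_cases hc : PySem.Chars.isdigit c = true
    · rw [if_pos hc, if_pos hc, List.foldl_cons]
      exact ih _
    · rw [if_neg hc, if_neg hc]
      exact ih _

-- B's fold from the initial state, in terms of the filtered list
lemma foldB_start (l : List Char) :
    l.foldl (fun (st : Int × Bool) c =>
        if PySem.Chars.isdigit c then (st.1 * 10 + ((c.toNat : Int) - ('0'.toNat : Int)), true) else st)
      (0, false)
      = (match l.filter PySem.Chars.isdigit with
         | [] => ((0 : Int), false)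
         | c :: cs => (cs.foldl (fun (a : Int) d => a * 10 + ((d.toNat : Int) - ('0'.toNat : Int)))
                        (0 * 10 + ((c.toNat : Int) - ('0'.toNat : Int))), true)) := by
  induction l with
  | nil => rfl
  | cons c rest ih =>
    rw [List.foldl_cons, List.filter_cons]
    by_cases hc : PySem.Chars.isdigit c = true
    · rw [if_pos hc, if_pos hc, foldB_true]
    · rw [if_neg hc, if_neg hc]
      exact ih

-- int() of a nonempty all-digit list
lemma pyInt_digits (c : Char) (cs : List Char)
    (h : ∀ d ∈ c :: cs, PySem.Chars.isdigit d = true) :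
    pyInt? (c :: cs) =
      some (((c :: cs).foldl (fun a d => a * 10 + (d.toNat - '0'.toNat)) 0 : Nat) : Int) := by
  have hrev : ∀ d ∈ (c :: cs).reverse, PySem.Chars.isdigit d = true := by
    intro d hd; exact h d (List.mem_reverse.mp hd)
  simp only [pyInt?]
  rw [dropWhile_digits _ h, dropWhile_digits _ hrev, List.reverse_reverse]
  have hc := h c (by simp)
  have hminus : c ≠ '-' := by rintro rfl; exact absurd hc (by decide)
  have hplus : c ≠ '+' := by rintro rfl; exact absurd hc (by decide)
  have hgo : pyIntDigitsVal? (c :: cs)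
      = some ((c :: cs).foldl (fun a d => a * 10 + (d.toNat - '0'.toNat)) 0) := by
    show pyIntGo (c :: cs) false 0 = _
    rw [pyIntGo.eq_def]
    simp only [hc, if_true, List.foldl_cons]
    exact pyIntGo_all_digits cs _ (fun d hd => h d (by simp [hd]))
  split
  · next heq => exact absurd (List.cons.inj heq).1.symm (Ne.symm hminus)
  · next heq => exact absurd (List.cons.inj heq).1.symm (Ne.symm hplus)
  · rw [hgo]; rfl

-- ===== VERDICT (by name: the statement is the Claim_ definition above) =====
theorem extract_days_since_last_run_spec : Claim_equal_extract_days_since_last_run := by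
  intro s _
  unfold Spec_extract_days_since_last_run extract_days_since_last_run extract_days_since_last_run_alt
  by_cases hg : (s = "" || s = "-") = true
  · simp [hg]
  · simp only [hg, if_false, Bool.false_eq_true]
    rw [foldB_start]
    have hfil : ∀ d ∈ s.toList.filter PySem.Chars.isdigit, PySem.Chars.isdigit d = true := by
      intro d hd; exact List.of_mem_filter hd
    cases hf : s.toList.filter PySem.Chars.isdigit with
    | nil => simp
    | cons c cs =>
      rw [hf] at hfil
      simp only [ne_eq, reduceCtorEq, not_false_iff, if_true]
      rw [pyInt_digits c cs hfil]
      rw [← foldl_int_eq_nat (c :: cs) 0 hfil, List.foldl_cons]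
      simp
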